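-- pv_equiv track=rewrite | github.com/yaspur/pruebas_tecnicas | ejercicio7.py | permutacion
-- ===== SOURCE A (Python) =====
-- def permutacion(numeros: list):
--
--     numeros.sort()
--     rango_numeros = numeros[-1]
--     numeros_faltantes = []
--
--     for i in range(rango_numeros):
--
--         numero_falta = i + 1
--         if numero_falta not in numeros:
--             numeros_faltantes.append(numero_falta)
--
--     if numeros_faltantes:
--         return numeros_faltantes[-1]
--     else:
--         return numeros[-1]
-- ===== SOURCE B (Python) =====
-- def permutacion(numeros: list):
--     # Same in-place sort side effect as A; single descending gap-scan instead of
--     # per-candidate membership tests.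
--     numeros.sort()
--     top = numeros[-1]
--     esperado = top
--     for x in reversed(numeros):
--         if esperado < 1:
--             break
--         if x == esperado:
--             esperado -= 1
--         elif x < esperado:
--             return esperado
--         # x > esperado: duplicate of an already-matched value, skip
--     return esperado if esperado >= 1 else top
-- ===== Notes on version B (the rewrite author's own statement) =====
-- stated objective: faster
-- what changed: Replaces the per-candidate 'not in numeros' membership scan over range(1,max+1) with a single descending gap-scan over the sorted list that returns the first gap (the largest missing value).
import Mathlib
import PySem

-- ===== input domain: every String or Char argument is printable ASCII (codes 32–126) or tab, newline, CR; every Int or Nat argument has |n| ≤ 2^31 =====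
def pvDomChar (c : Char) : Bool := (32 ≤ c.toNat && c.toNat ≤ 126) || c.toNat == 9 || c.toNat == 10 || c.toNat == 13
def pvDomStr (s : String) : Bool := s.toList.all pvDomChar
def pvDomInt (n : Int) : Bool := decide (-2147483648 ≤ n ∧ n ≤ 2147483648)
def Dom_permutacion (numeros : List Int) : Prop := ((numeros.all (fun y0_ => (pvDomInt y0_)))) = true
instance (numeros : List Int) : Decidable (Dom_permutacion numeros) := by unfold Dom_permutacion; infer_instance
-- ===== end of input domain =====

-- B replaces A's per-candidate membership scan over range(1, max+1) by one descending
-- gap-scan over the sorted list; both sort the argument in place (same side effect),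
-- and the equivalence proved here is about the return value.

-- ===== PORT A =====
def permutacion (numeros : List Int) : Int :=
  let s := PySem.List.sorted numeros (fun x => x) false
  let rango := PySem.List.pyGetD s (-1) 0
  let faltantes := (PySem.List.pyRange 0 rango 1).foldl
    (fun acc i => if (i + 1) ∉ s then acc ++ [i + 1] else acc) []
  if faltantes ≠ [] then PySem.List.pyGetD faltantes (-1) 0
  else PySem.List.pyGetD s (-1) 0

-- ===== PORT B =====
-- the 'for x in reversed(numeros)' loop of Source B with its break / early return
def altScan (l : List Int) (esperado top : Int) : Int :=
  match l with
  | [] => if esperado ≥ 1 then esperado else top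
  | x :: r =>
    if esperado < 1 then top
    else if x = esperado then altScan r (esperado - 1) top
    else if x < esperado then esperado
    else altScan r esperado top

def permutacion_alt (numeros : List Int) : Int :=
  let s := PySem.List.sorted numeros (fun x => x) false
  let top := PySem.List.pyGetD s (-1) 0
  altScan s.reverse top top

-- ===== PRECONDITION & SPEC =====
-- Pre_ excludes only the empty list, on which both A and B raise IndexError when indexing the last element.
def Pre_permutacion (numeros : List Int) : Prop := numeros ≠ []
instance (numeros : List Int) : Decidable (Pre_permutacion numeros) := by
  unfold Pre_permutacion; infer_instance

def pvWitness_permutacion : List Int := [3, 1, 3]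

def Spec_permutacion (numeros : List Int) (out : Int) : Prop := out = permutacion_alt numeros
instance (numeros : List Int) (out : Int) : Decidable (Spec_permutacion numeros out) := by unfold Spec_permutacion; infer_instance

-- ===== CLAIM (what is proved, stated in full; the proofs are below) =====
def Claim_equal_permutacion : Prop := ∀ (numeros : List Int), Dom_permutacion numeros → Pre_permutacion numeros → Spec_permutacion numeros (permutacion numeros)

-- ===== LEMMAS AND PROOFS =====

-- the missing values 1..e of l, ascending (the shape of A's faltantes list)
def miss (l : List Int) (e : Int) : List Int :=
  ((PySem.List.pyRange 0 e 1).filter (fun i => decide ((i + 1) ∉ l))).map (fun i => i + 1)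

theorem miss_of_nonpos (l : List Int) (e : Int) (h : e < 1) : miss l e = [] := by
  simp [miss, PySem.List.pyRange_one_eq_nil (by omega : e ≤ 0)]

-- split the candidate range at its top, for 1 ≤ e
theorem miss_split (l : List Int) (e : Int) (h : 1 ≤ e) :
    miss l e = miss l (e - 1) ++ (if e ∉ l then [e] else []) := by
  have h1 : PySem.List.pyRange 0 e 1 = PySem.List.pyRange 0 (e - 1) 1 ++ [e - 1] := by
    have := PySem.List.pyRange_one_succ_right (a := 0) (b := e - 1) (by omega)
    simpa using this
  simp only [miss, h1, List.filter_append, List.map_append]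
  congr 1
  by_cases he : e ∉ l <;> simp [he, sub_add_cancel]

theorem mem_miss_aux (e i : Int) (hi : i ∈ PySem.List.pyRange 0 e 1) :
    1 ≤ i + 1 ∧ i + 1 ≤ e := by
  rw [PySem.List.mem_pyRange_one] at hi; omega

-- a cons strictly above every candidate does not change the missing list
theorem miss_cons_of_lt (l : List Int) (x e : Int) (hx : e < x) :
    miss (x :: l) e = miss l e := by
  simp only [miss]
  congr 1
  apply List.filter_congr
  intro i hi
  have hb := mem_miss_aux e i hi
  simp only [decide_eq_decide, List.mem_cons, not_or]
  constructor
  · exact fun h => h.2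
  · intro h; exact ⟨by omega, h⟩

-- B's gap-scan on a descending list returns the last missing value in 1..e, else top
theorem altScan_eq (l : List Int) (e top : Int)
    (hl : l.Pairwise (fun a b => b ≤ a)) :
    altScan l e top = (miss l e).getLastD top := by
  induction l generalizing e with
  | nil =>
    by_cases he : e ≥ 1
    · have h2 : miss [] e = miss [] (e - 1) ++ [e] := by
        rw [miss_split [] e (by omega)]; simp
      simp [altScan, he, h2]
    · simp [altScan, he, miss_of_nonpos [] e (by omega)]
  | cons x r ih =>
    rw [List.pairwise_cons] at hl
    by_cases h1 : e < 1
    · simp [altScan, h1, miss_of_nonpos _ e h1]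
    · by_cases h2 : x = e
      · have hmiss : miss (x :: r) e = miss r (e - 1) := by
          rw [miss_split (x :: r) e (by omega)]
          have hx : e ∈ x :: r := by rw [← h2]; exact List.mem_cons_self
          rw [if_neg (by simp [hx])]
          rw [show x = e from h2, miss_cons_of_lt r e (e - 1) (by omega)]
          simp
        simp only [altScan, if_neg h1, if_pos h2, hmiss]
        exact ih (e - 1) hl.2
      · by_cases h3 : x < e
        · -- the first gap: e is missing, since every element of x :: r is ≤ x < e
          have hnm : e ∉ x :: r := by
            simp only [List.mem_cons, not_or]
            refine ⟨by omega, fun hc => ?_⟩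
            have := hl.1 e hc; omega
          have hmiss : miss (x :: r) e = miss (x :: r) (e - 1) ++ [e] := by
            rw [miss_split _ e (by omega), if_pos hnm]
          simp [altScan, h1, h2, h3, hmiss]
        · have hx : e < x := by omega
          simp only [altScan, if_neg h1, if_neg h2, if_neg h3]
          rw [miss_cons_of_lt r x e hx]
          exact ih e hl.2

theorem permutacion_spec' (numeros : List Int) :
    permutacion numeros = permutacion_alt numeros := by
  simp only [permutacion, permutacion_alt]
  set s := PySem.List.sorted numeros (fun x => x) false with hs
  set top := PySem.List.pyGetD s (-1) 0 with htop
  have hfold : (PySem.List.pyRange 0 top 1).foldl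
      (fun acc i => if (i + 1) ∉ s then acc ++ [i + 1] else acc) [] = miss s top := by
    have := PySem.List.foldl_append_if (fun i : Int => decide ((i + 1) ∉ s))
      (fun i => i + 1) (PySem.List.pyRange 0 top 1) []
    simpa [miss] using this
  have hrev : (s.reverse).Pairwise (fun a b => b ≤ a) := by
    rw [List.pairwise_reverse]
    exact PySem.List.sorted_pairwise numeros (fun x => x)
  have hmr : miss s.reverse top = miss s top := by
    simp [miss]
  rw [hfold, altScan_eq s.reverse top top hrev, hmr]
  by_cases hm : miss s top = []
  · simp [hm]
  · rw [if_pos hm, PySem.List.pyGetD_neg_one (miss s top) 0 hm,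
      List.getLastD_eq_getLast?, List.getLast?_eq_some_getLast hm]
    rfl

-- ===== VERDICT (by name: the statement is the Claim_ definition above) =====
theorem permutacion_spec : Claim_equal_permutacion := by
  intro numeros _ _
  exact permutacion_spec' numeros
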